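-- pv_equiv track=rewrite | github.com/jennymunera/CAF_cartera_agents | utils/version_handler.py | apply_priority_rules
-- ===== SOURCE A (Python) =====
-- from typing import Dict, List, Optional, Tuple
--
-- def apply_priority_rules(documents: List[Dict], priority_prefixes: List[str]) -> List[Dict]:
--     """Aplica reglas de prioridad por prefijos (ej: ROP > INI > DEC > IFS)
--
--     Args:
--         documents: Lista de documentos con metadatos
--         priority_prefixes: Lista de prefijos en orden de prioridad
--
--     Returns:
--         List[Dict]: Documentos ordenados por prioridad
--     """
--     def get_priority_score(doc):
--         source_name = doc.get('source_name', '').upper()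
--         for i, prefix in enumerate(priority_prefixes):
--             if source_name.startswith(prefix.upper()):
--                 return i
--         return len(priority_prefixes)  # Menor prioridad para documentos sin prefijo conocido
--
--     return sorted(documents, key=get_priority_score)
-- ===== SOURCE B (Python) =====
-- from typing import Dict, List
--
--
-- def apply_priority_rules(documents: List[Dict], priority_prefixes: List[str]) -> List[Dict]:
--     """Bucket sort by prefix priority: one pass to bucket, one pass to flatten."""
--     def get_priority_score(doc):
--         source_name = doc.get('source_name', '').upper()
--         for i, prefix in enumerate(priority_prefixes):
--             if source_name.startswith(prefix.upper()):
--                 return i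
--         return len(priority_prefixes)
--
--     buckets = [[] for _ in range(len(priority_prefixes) + 1)]
--     for doc in documents:
--         buckets[get_priority_score(doc)].append(doc)
--     return [doc for bucket in buckets for doc in bucket]
-- ===== Notes on version B (the rewrite author's own statement) =====
-- stated objective: alternative
-- what changed: Replaces the comparison sort (sorted with a key) by a stable bucket sort: each document is appended to the bucket of its priority score in one pass and the buckets are concatenated in prefix order; in practice the per-document key computation dominates, so the cost is similar.
import Mathlib
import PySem

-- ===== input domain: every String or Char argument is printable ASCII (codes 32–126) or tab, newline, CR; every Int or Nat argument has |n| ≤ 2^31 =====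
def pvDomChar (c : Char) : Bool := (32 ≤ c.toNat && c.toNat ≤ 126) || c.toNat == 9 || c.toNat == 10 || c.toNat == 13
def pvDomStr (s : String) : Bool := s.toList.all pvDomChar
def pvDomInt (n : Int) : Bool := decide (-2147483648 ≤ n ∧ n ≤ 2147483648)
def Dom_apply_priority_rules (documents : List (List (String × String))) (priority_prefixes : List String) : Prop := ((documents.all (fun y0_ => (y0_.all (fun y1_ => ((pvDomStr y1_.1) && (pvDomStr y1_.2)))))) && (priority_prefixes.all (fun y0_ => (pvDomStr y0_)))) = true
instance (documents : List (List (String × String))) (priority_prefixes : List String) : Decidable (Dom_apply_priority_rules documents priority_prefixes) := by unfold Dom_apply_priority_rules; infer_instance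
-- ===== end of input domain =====

-- B replaces the comparison sort by a stable one-pass bucket sort on the bounded priority score (alternative decomposition, similar cost).

-- shared helper: get_priority_score (identical in A and B) — the enumerate loop, returning
-- the index of the first matching prefix, or len(priority_prefixes) when none matches
def pvScoreGo (source_name : String) : Nat → List String → Nat
  | i, [] => i
  | i, prefix_ :: rest =>
      if PySem.Str.startswith source_name (PySem.Str.upper prefix_) then i
      else pvScoreGo source_name (i + 1) rest

def pvScore (priority_prefixes : List String) (doc : List (String × String)) : Nat :=
  let source_name := PySem.Str.upper ((PySem.Dict.mk doc).getD "source_name" "")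
  pvScoreGo source_name 0 priority_prefixes

-- ===== PORT A =====
def apply_priority_rules (documents : List (List (String × String))) (priority_prefixes : List String) : List (List (String × String)) :=
  PySem.List.sorted documents (fun doc => pvScore priority_prefixes doc) false

-- ===== PORT B =====
-- buckets[i].append(doc): walk to bucket i and append at its end
def pvBucketAdd {α : Type} : List (List α) → Nat → α → List (List α)
  | [], _, _ => []
  | b :: bs, 0, d => (b ++ [d]) :: bs
  | b :: bs, n + 1, d => b :: pvBucketAdd bs n d

def apply_priority_rules_alt (documents : List (List (String × String))) (priority_prefixes : List String) : List (List (String × String)) :=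
  let buckets := documents.foldl
    (fun bs doc => pvBucketAdd bs (pvScore priority_prefixes doc) doc)
    (List.replicate (priority_prefixes.length + 1) [])
  buckets.flatten

-- ===== PRECONDITION & SPEC =====
def Spec_apply_priority_rules (documents : List (List (String × String))) (priority_prefixes : List String) (out : List (List (String × String))) : Prop := out = apply_priority_rules_alt documents priority_prefixes
instance (documents : List (List (String × String))) (priority_prefixes : List String) (out : List (List (String × String))) : Decidable (Spec_apply_priority_rules documents priority_prefixes out) := by unfold Spec_apply_priority_rules; infer_instance

-- ===== CLAIM (what is proved, stated in full; the proofs are below) =====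
def Claim_equal_apply_priority_rules : Prop := ∀ (documents : List (List (String × String))) (priority_prefixes : List String), Dom_apply_priority_rules documents priority_prefixes → Spec_apply_priority_rules documents priority_prefixes (apply_priority_rules documents priority_prefixes)

-- ===== LEMMAS AND PROOFS =====

-- bucket invariant: bucket j of bs holds only elements with key = s + j
def pvBInv {α : Type} (key : α → Nat) : Nat → List (List α) → Prop
  | _, [] => True
  | s, b :: bs => (∀ d ∈ b, key d = s) ∧ pvBInv key (s + 1) bs

theorem pvScoreGo_le (sn : String) (ps : List String) (i : Nat) :
    pvScoreGo sn i ps ≤ i + ps.length := by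
  induction ps generalizing i with
  | nil => simp [pvScoreGo]
  | cons p rest ih =>
      simp only [pvScoreGo]
      split
      · simp
      · have := ih (i + 1); simpa [Nat.add_comm, Nat.add_left_comm] using this.trans (by omega)

theorem pvScore_lt (ps : List String) (d : List (String × String)) :
    pvScore ps d < ps.length + 1 := by
  have := pvScoreGo_le (PySem.Str.upper ((PySem.Dict.mk d).getD "source_name" "")) ps 0
  simpa [pvScore] using Nat.lt_succ_of_le (by simpa using this)

theorem pvBInv_replicate {α : Type} (key : α → Nat) (m s : Nat) :
    pvBInv key s (List.replicate m ([] : List α)) := by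
  induction m generalizing s with
  | zero => simp [pvBInv]
  | succ m ih => exact ⟨by simp, ih (s + 1)⟩

theorem pvBInv_ge {α : Type} (key : α → Nat) (s : Nat) (bs : List (List α))
    (h : pvBInv key s bs) : ∀ y ∈ bs.flatten, s ≤ key y := by
  induction bs generalizing s with
  | nil => simp
  | cons b bs ih =>
      intro y hy
      simp only [List.flatten_cons] at hy
      rcases List.mem_append.1 hy with h1 | h2
      · exact le_of_eq (h.1 y h1).symm
      · exact Nat.le_of_succ_le (ih (s + 1) h.2 y h2)

theorem pvInsertBy_append {α : Type} (before : α → α → Bool) (x : α) (l1 l2 : List α)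
    (h : ∀ y ∈ l1, before x y = false) :
    PySem.List.insertBy before x (l1 ++ l2) = l1 ++ PySem.List.insertBy before x l2 := by
  induction l1 with
  | nil => simp
  | cons y ys ih =>
      have hy : before x y = false := h y (by simp)
      have : PySem.List.insertBy before x (y :: (ys ++ l2)) =
          if before x y then x :: y :: (ys ++ l2) else y :: PySem.List.insertBy before x (ys ++ l2) := rfl
      simp only [List.cons_append, this, hy, if_neg Bool.false_ne_true]
      simp [ih (fun z hz => h z (by simp [hz]))]

theorem pvInsertBy_all_before {α : Type} (before : α → α → Bool) (x : α) (l : List α)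
    (h : ∀ y ∈ l, before x y = true) :
    PySem.List.insertBy before x l = x :: l := by
  cases l with
  | nil => rfl
  | cons y ys =>
      have : PySem.List.insertBy before x (y :: ys) =
          if before x y then x :: y :: ys else y :: PySem.List.insertBy before x ys := rfl
      rw [this, if_pos (h y (by simp))]

theorem pvInsert_flatten {α : Type} (key : α → Nat) (x : α) :
    ∀ (bs : List (List α)) (s i : Nat), pvBInv key s bs → i < bs.length → key x = s + i →
    PySem.List.insertBy (fun a b => decide (key a < key b)) x bs.flatten =
      (pvBucketAdd bs i x).flatten := by
  intro bs
  induction bs with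
  | nil => intro s i _ h; simp at h
  | cons b bs ih =>
      intro s i hinv hlen hkey
      cases i with
      | zero =>
          have h1 : ∀ y ∈ b, (fun a b => decide (key a < key b)) x y = false := by
            intro y hy
            have := hinv.1 y hy
            simp [this, hkey]
          have h2 : ∀ y ∈ bs.flatten, (fun a b => decide (key a < key b)) x y = true := by
            intro y hy
            have := pvBInv_ge key (s + 1) bs hinv.2 y hy
            simp only [decide_eq_true_eq]
            omega
          simp only [List.flatten_cons]
          rw [pvInsertBy_append _ _ _ _ h1, pvInsertBy_all_before _ _ _ h2]
          simp [pvBucketAdd]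
      | succ n =>
          have h1 : ∀ y ∈ b, (fun a b => decide (key a < key b)) x y = false := by
            intro y hy
            have := hinv.1 y hy
            simp only [decide_eq_false_iff_not, not_lt]
            omega
          simp only [List.flatten_cons]
          rw [pvInsertBy_append _ _ _ _ h1,
            ih (s + 1) n hinv.2 (by simpa using hlen) (by omega)]
          simp [pvBucketAdd]

theorem pvBucketAdd_length {α : Type} (x : α) :
    ∀ (bs : List (List α)) (i : Nat), (pvBucketAdd bs i x).length = bs.length := by
  intro bs
  induction bs with
  | nil => intro i; rfl
  | cons b bs ih => intro i; cases i <;> simp [pvBucketAdd, ih]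

theorem pvBInv_bucketAdd {α : Type} (key : α → Nat) (x : α) :
    ∀ (bs : List (List α)) (s i : Nat), pvBInv key s bs → key x = s + i →
    pvBInv key s (pvBucketAdd bs i x) := by
  intro bs
  induction bs with
  | nil => intro s i h _; exact h
  | cons b bs ih =>
      intro s i hinv hkey
      cases i with
      | zero =>
          refine ⟨?_, hinv.2⟩
          intro d hd
          rcases List.mem_append.1 hd with h1 | h2
          · exact hinv.1 d h1
          · simp at h2; subst h2; omega
      | succ n => exact ⟨hinv.1, ih (s + 1) n hinv.2 (by omega)⟩

theorem pvMaster {α : Type} (key : α → Nat) :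
    ∀ (docs : List α) (bs : List (List α)), pvBInv key 0 bs →
    (∀ d ∈ docs, key d < bs.length) →
    docs.foldl (fun acc x => PySem.List.insertBy (fun a b => decide (key a < key b)) x acc) bs.flatten
      = (docs.foldl (fun bs x => pvBucketAdd bs (key x) x) bs).flatten := by
  intro docs
  induction docs with
  | nil => intro bs _ _; rfl
  | cons d docs ih =>
      intro bs hinv hbound
      simp only [List.foldl_cons]
      rw [pvInsert_flatten key d bs 0 (key d) hinv (hbound d (by simp)) (by omega)]
      exact ih _ (pvBInv_bucketAdd key d bs 0 (key d) hinv (by omega))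
        (fun x hx => by rw [pvBucketAdd_length]; exact hbound x (by simp [hx]))

-- ===== VERDICT (by name: the statement is the Claim_ definition above) =====
theorem apply_priority_rules_spec : Claim_equal_apply_priority_rules := by
  intro documents priority_prefixes _
  unfold Spec_apply_priority_rules apply_priority_rules apply_priority_rules_alt
  rw [PySem.List.sorted_eq_foldl_insertBy]
  have h0 : (List.replicate (priority_prefixes.length + 1) ([] : List (List (String × String)))).flatten = [] := by
    simp
  have h := pvMaster (pvScore priority_prefixes) documents
    (List.replicate (priority_prefixes.length + 1) [])
    (pvBInv_replicate _ _ 0)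
    (fun d _ => by rw [List.length_replicate]; exact pvScore_lt priority_prefixes d)
  rw [h0] at h
  exact h
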